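-- pv_equiv track=rewrite | github.com/rdyjun/coding-test | 프로그래머스/unrated/161989. 덧칠하기/덧칠하기.py | solution
-- ===== SOURCE A (Python) =====
-- def solution(n, m, section):
--     answer = 0
--     now = 0
--     for i in section:
--         if now <= i:
--             now = i + m
--             answer += 1
--
--     return answer
-- ===== SOURCE B (Python) =====
-- def solution(n, m, section):
--     # Per-stroke loop: repeatedly drop the prefix of sections already covered
--     # by the current stroke, then start a new stroke at the first uncovered one.
--     answer = 0
--     now = 0
--     rest = section
--     while True:
--         j = 0
--         while j < len(rest) and rest[j] < now:
--             j += 1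
--         if j == len(rest):
--             return answer
--         answer += 1
--         now = rest[j] + m
--         rest = rest[j + 1:]
-- ===== Notes on version B (the rewrite author's own statement) =====
-- stated objective: alternative
-- what changed: Replaces A's per-element fold (one conditional per section) by a per-stroke outer loop that drops the covered prefix of the remaining list and starts the next stroke at its first uncovered element.
import Mathlib
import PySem

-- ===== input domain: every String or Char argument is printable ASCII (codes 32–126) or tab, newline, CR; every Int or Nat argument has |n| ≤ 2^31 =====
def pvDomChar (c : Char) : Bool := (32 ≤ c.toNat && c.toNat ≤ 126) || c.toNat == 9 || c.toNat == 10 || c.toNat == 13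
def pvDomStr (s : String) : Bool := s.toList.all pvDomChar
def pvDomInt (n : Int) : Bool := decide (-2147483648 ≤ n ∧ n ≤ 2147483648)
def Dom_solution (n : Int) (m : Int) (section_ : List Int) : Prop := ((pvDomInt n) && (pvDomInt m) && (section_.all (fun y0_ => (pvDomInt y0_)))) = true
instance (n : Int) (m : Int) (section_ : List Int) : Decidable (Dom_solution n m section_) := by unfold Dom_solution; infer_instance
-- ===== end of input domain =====

-- B replaces A's per-element fold by a per-stroke loop dropping the covered prefix; same O(n) cost (objective: alternative).


-- ===== PORT A =====
-- A: one fold over section_, state (answer, now); if now ≤ i start a stroke at i.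
def solution (n : Int) (m : Int) (section_ : List Int) : Int :=
  (section_.foldl (fun (st : Int × Int) i => if st.2 ≤ i then (st.1 + 1, i + m) else st) (0, 0)).1

-- ===== PORT B =====
-- B's inner while loop: drop the leading sections already covered (value < now).
def altSkip (now : Int) : List Int → List Int
  | [] => []
  | x :: xs => if x < now then altSkip now xs else x :: xs

theorem altSkip_length_le (now : Int) (xs : List Int) : (altSkip now xs).length ≤ xs.length := by
  induction xs with
  | nil => simp [altSkip]
  | cons x xs ih =>
    simp only [altSkip]
    split
    · simp only [List.length_cons]; omega
    · simp

-- B's outer while loop: one iteration per stroke.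
def altGo (m : Int) (now : Int) (rest : List Int) : Int :=
  match h : altSkip now rest with
  | [] => 0
  | x :: rest' => 1 + altGo m (x + m) rest'
termination_by rest.length
decreasing_by
  have := altSkip_length_le now rest
  rw [h] at this
  simp at this
  omega

def solution_alt (n : Int) (m : Int) (section_ : List Int) : Int :=
  altGo m 0 section_

-- ===== PRECONDITION & SPEC =====
def Spec_solution (n : Int) (m : Int) (section_ : List Int) (out : Int) : Prop := out = solution_alt n m section_
instance (n : Int) (m : Int) (section_ : List Int) (out : Int) : Decidable (Spec_solution n m section_ out) := by unfold Spec_solution; infer_instance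

-- ===== CLAIM (what is proved, stated in full; the proofs are below) =====
def Claim_equal_solution : Prop := ∀ (n : Int) (m : Int) (section_ : List Int), Dom_solution n m section_ → Spec_solution n m section_ (solution n m section_)

-- ===== LEMMAS AND PROOFS =====
theorem altGo_eq (m now : Int) (rest : List Int) :
    altGo m now rest = match altSkip now rest with
      | [] => 0
      | x :: rest' => 1 + altGo m (x + m) rest' := by
  rw [altGo]
  split <;> simp_all

theorem altGo_cons_ge (m now x : Int) (xs : List Int) (h : now ≤ x) :
    altGo m now (x :: xs) = 1 + altGo m (x + m) xs := by
  rw [altGo_eq]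
  simp [altSkip, not_lt.mpr h]

theorem altGo_cons_lt (m now x : Int) (xs : List Int) (h : x < now) :
    altGo m now (x :: xs) = altGo m now xs := by
  rw [altGo_eq, altGo_eq]
  simp [altSkip, h]

theorem fold_eq_altGo (m : Int) (xs : List Int) : ∀ (a now : Int),
    (xs.foldl (fun (st : Int × Int) i => if st.2 ≤ i then (st.1 + 1, i + m) else st) (a, now)).1
      = a + altGo m now xs := by
  induction xs with
  | nil =>
    intro a now
    rw [altGo_eq]
    simp [altSkip]
  | cons x xs ih =>
    intro a now
    by_cases hx : now ≤ x
    · simp only [List.foldl_cons, if_pos hx, altGo_cons_ge m now x xs hx, ih]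
      omega
    · simp only [List.foldl_cons, if_neg hx, altGo_cons_lt m now x xs (lt_of_not_ge hx), ih]

-- ===== VERDICT (by name: the statement is the Claim_ definition above) =====
theorem solution_spec : Claim_equal_solution := by
  intro n m section_ _
  unfold Spec_solution solution solution_alt
  simpa using fold_eq_altGo m section_ 0 0
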